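-- pv_equiv track=rewrite | github.com/unil-lettres/variance-input | medite/app/old/variance/medite/aligne.py | _couverture
-- ===== SOURCE A (Python) =====
-- def _couverture(pi):
--     """Calcule la couverture d'une liste d'entiers
--     @type pi: list
--     @param pi: la liste d'entiers dont on veut calculer la couverture
--     @rtype:   list of list
--     @return:  la couverture de pi
--     """
--     tailleCouverture = 0
--     couverture = []
--     couvertureLast = []
--     for i in range(len(pi)):
--         j = 0
--
--         while (j < tailleCouverture) and (pi[i][0] > couvertureLast[j]):
--             # recherche de l'endroit ou il faut inserer l'element
--             j += 1
--         # insertion de l'élément dans la couverture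
--         if j == tailleCouverture:
--             # on doit créer une nouvelle sequence dans la couverture
--             tailleCouverture += 1
--             couverture.append([pi[i]])
--             couvertureLast.append(pi[i][0])
--         else:
--             couverture[j].append(pi[i])
--             couvertureLast[j] = pi[i][0]
--
--     return couverture
-- ===== SOURCE B (Python) =====
-- def _couverture(pi):
--     """Two staged passes: first assign each row a pile index via a recursive
--     bisect_left on the (sorted) list of pile tops, then scatter the rows into
--     pre-allocated piles."""
--     def place(lasts, x, lo, hi):
--         if lo >= hi:
--             return lo
--         mid = (lo + hi) // 2
--         if lasts[mid] < x:
--             return place(lasts, x, mid + 1, hi)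
--         return place(lasts, x, lo, mid)
--
--     lasts = []
--     idx = []
--     for row in pi:
--         j = place(lasts, row[0], 0, len(lasts))
--         if j == len(lasts):
--             lasts.append(row[0])
--         else:
--             lasts[j] = row[0]
--         idx.append(j)
--     piles = [[] for _ in range(len(lasts))]
--     for row, j in zip(pi, idx):
--         piles[j].append(row)
--     return piles
-- ===== Notes on version B (the rewrite author's own statement) =====
-- stated objective: alternative
-- what changed: A's single loop with an inner linear scan over pile tops is replaced by two staged passes: pass 1 only maintains the sorted pile tops and assigns each row a pile index via a recursive bisect_left; pass 2 scatters the rows into pre-allocated piles.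
import Mathlib
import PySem

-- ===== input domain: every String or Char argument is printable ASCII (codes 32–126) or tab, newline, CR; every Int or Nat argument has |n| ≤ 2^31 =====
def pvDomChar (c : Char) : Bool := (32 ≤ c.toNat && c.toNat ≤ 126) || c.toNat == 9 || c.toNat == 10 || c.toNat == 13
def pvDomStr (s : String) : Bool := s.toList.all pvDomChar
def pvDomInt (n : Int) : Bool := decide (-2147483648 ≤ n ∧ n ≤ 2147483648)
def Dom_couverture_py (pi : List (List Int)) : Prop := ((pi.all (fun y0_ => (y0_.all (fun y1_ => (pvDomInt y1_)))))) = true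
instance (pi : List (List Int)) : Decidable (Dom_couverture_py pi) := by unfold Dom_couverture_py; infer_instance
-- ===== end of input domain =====

-- B is a two-stage rewrite: pass 1 assigns each row a pile index via a recursive
-- bisect_left on the sorted pile tops, pass 2 scatters the rows into pre-allocated piles.

-- ===== PORT A =====
-- the `while (j < tailleCouverture) and (pi[i][0] > couvertureLast[j])` loop
def whileA (taille : Nat) (lasts : List Int) (x : Int) (j : Nat) : Nat :=
  if j < taille ∧ x > lasts.getD j 0 then whileA taille lasts x (j + 1) else j
termination_by taille - j

-- one iteration of A's for-loop; state = (tailleCouverture, couverture, couvertureLast)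
-- (pi[i][0] is `headD 0`: Pre_ guarantees nonempty rows; Python raises IndexError otherwise)
def stepA (st : Nat × List (List (List Int)) × List Int) (e : List Int) :
    Nat × List (List (List Int)) × List Int :=
  let x := e.headD 0
  let j := whileA st.1 st.2.2 x 0
  if j = st.1 then
    (st.1 + 1, st.2.1 ++ [[e]], st.2.2 ++ [x])
  else
    (st.1, st.2.1.set j (st.2.1.getD j [] ++ [e]), st.2.2.set j x)

def couverture_py (pi : List (List Int)) : List (List (List Int)) :=
  (pi.foldl stepA (0, [], [])).2.1

-- ===== PORT B =====
-- Source B's recursive bisect_left `place`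
def place (a : List Int) (x : Int) (lo hi : Nat) : Nat :=
  if lo < hi then
    let mid := (lo + hi) / 2
    if a.getD mid 0 < x then place a x (mid + 1) hi else place a x lo mid
  else lo
termination_by hi - lo

-- pass 1: one iteration of the assignment loop; state = (lasts, idx)
def stepB1 (st : List Int × List Nat) (row : List Int) : List Int × List Nat :=
  let j := place st.1 (row.headD 0) 0 st.1.length
  (if j = st.1.length then st.1 ++ [row.headD 0] else st.1.set j (row.headD 0),
   st.2 ++ [j])

-- pass 2: scatter one row into its pile
def stepB2 (res : List (List (List Int))) (rj : List Int × Nat) : List (List (List Int)) :=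
  res.set rj.2 (res.getD rj.2 [] ++ [rj.1])

def couverture_py_alt (pi : List (List Int)) : List (List (List Int)) :=
  let p := pi.foldl stepB1 ([], [])
  (pi.zip p.2).foldl stepB2 (List.replicate p.1.length [])

-- ===== PRECONDITION & SPEC =====
-- Pre_ excludes inputs containing an empty row: there Python A raises IndexError on pi[i][0] (and B likewise on row[0]).
def Pre_couverture_py (pi : List (List Int)) : Prop := ∀ l ∈ pi, l ≠ []
instance (pi : List (List Int)) : Decidable (Pre_couverture_py pi) := by unfold Pre_couverture_py; infer_instance
def pvWitness_couverture_py : List (List Int) := [[3, 1], [1], [2], [2]]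

def Spec_couverture_py (pi : List (List Int)) (out : List (List (List Int))) : Prop := out = couverture_py_alt pi
instance (pi : List (List Int)) (out : List (List (List Int))) : Decidable (Spec_couverture_py pi out) := by unfold Spec_couverture_py; infer_instance

-- ===== CLAIM (what is proved, stated in full; the proofs are below) =====
def Claim_equal_couverture_py : Prop := ∀ (pi : List (List Int)), Dom_couverture_py pi → Pre_couverture_py pi → Spec_couverture_py pi (couverture_py pi)

-- ===== LEMMAS AND PROOFS =====

-- `lasts` is nondecreasing (the patience-pile invariant)
def Mono (a : List Int) : Prop := ∀ i j, i ≤ j → j < a.length → a.getD i 0 ≤ a.getD j 0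

-- characterisation of the insertion index: first j with lasts[j] ≥ x (or the length)
def StopAt (a : List Int) (x : Int) (r : Nat) : Prop :=
  r ≤ a.length ∧ (∀ i < r, a.getD i 0 < x) ∧ (r = a.length ∨ ¬ a.getD r 0 < x)

lemma stopAt_unique {a : List Int} {x : Int} {r₁ r₂ : Nat}
    (h₁ : StopAt a x r₁) (h₂ : StopAt a x r₂) : r₁ = r₂ := by
  obtain ⟨hl₁, hp₁, he₁⟩ := h₁
  obtain ⟨hl₂, hp₂, he₂⟩ := h₂
  rcases Nat.lt_trichotomy r₁ r₂ with h | h | h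
  · exact absurd (hp₂ _ h) (he₁.resolve_left (by omega))
  · exact h
  · exact absurd (hp₁ _ h) (he₂.resolve_left (by omega))

lemma whileA_stop (a : List Int) (x : Int) :
    ∀ k j, a.length - j ≤ k → j ≤ a.length → (∀ i < j, a.getD i 0 < x) →
      StopAt a x (whileA a.length a x j) := by
  intro k
  induction k with
  | zero =>
    intro j hk hj hp
    have hj' : j = a.length := by omega
    subst hj'
    rw [whileA]
    simp only [lt_irrefl, false_and, if_false]
    exact ⟨le_refl _, hp, Or.inl rfl⟩
  | succ k ih =>
    intro j hk hj hp
    rw [whileA]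
    by_cases h : j < a.length ∧ x > a.getD j 0
    · rw [if_pos h]
      exact ih (j + 1) (by omega) (by omega)
        (fun i hi => by rcases Nat.lt_succ_iff_lt_or_eq.mp hi with hi | hi
                        · exact hp i hi
                        · exact hi ▸ h.2)
    · rw [if_neg h]
      refine ⟨hj, hp, ?_⟩
      by_cases hjl : j = a.length
      · exact Or.inl hjl
      · exact Or.inr (by push Not at h; exact not_lt.mpr (h (by omega)))

lemma place_stop (a : List Int) (x : Int) (hm : Mono a) :
    ∀ k lo hi, hi - lo ≤ k → lo ≤ hi → hi ≤ a.length →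
      (∀ i < lo, a.getD i 0 < x) → (∀ i, hi ≤ i → i < a.length → ¬ a.getD i 0 < x) →
      StopAt a x (place a x lo hi) := by
  intro k
  induction k with
  | zero =>
    intro lo hi hk hlh hha hp hs
    have : ¬ lo < hi := by omega
    rw [place, if_neg this]
    refine ⟨by omega, hp, ?_⟩
    by_cases h : lo = a.length
    · exact Or.inl h
    · exact Or.inr (hs lo (by omega) (by omega))
  | succ k ih =>
    intro lo hi hk hlh hha hp hs
    rw [place]
    by_cases h : lo < hi
    · rw [if_pos h]
      have hmid₁ : lo ≤ (lo + hi) / 2 := by omega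
      have hmid₂ : (lo + hi) / 2 < hi := by omega
      by_cases hc : a.getD ((lo + hi) / 2) 0 < x
      · rw [if_pos hc]
        exact ih ((lo + hi) / 2 + 1) hi (by omega) (by omega) hha
          (fun i hi' => lt_of_le_of_lt (hm i ((lo + hi) / 2) (by omega) (by omega)) hc) hs
      · rw [if_neg hc]
        exact ih lo ((lo + hi) / 2) (by omega) (by omega) (by omega) hp
          (fun i hi' hil hlt =>
            hc (lt_of_le_of_lt (hm ((lo + hi) / 2) i hi' hil) hlt))
    · rw [if_neg h]
      refine ⟨by omega, hp, ?_⟩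
      by_cases he : lo = a.length
      · exact Or.inl he
      · exact Or.inr (hs lo (by omega) (by omega))

-- A's linear scan and B's binary search agree on a sorted `lasts`
lemma scan_eq_place (a : List Int) (x : Int) (hm : Mono a) :
    whileA a.length a x 0 = place a x 0 a.length :=
  stopAt_unique
    (whileA_stop a x a.length 0 (by omega) (by omega) (by omega))
    (place_stop a x hm a.length 0 a.length (by omega) (by omega) (le_refl _)
      (by omega) (fun i h₁ h₂ => absurd h₁ (by omega)))

lemma getD_set {a : List Int} {r i : Nat} {x : Int} :
    (a.set r x).getD i 0 = if i = r ∧ r < a.length then x else a.getD i 0 := by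
  by_cases h : i = r ∧ r < a.length
  · simp [List.getD, h.1, h.2]
  · rw [if_neg h]
    by_cases h1 : i = r
    · have hr : ¬ r < a.length := fun hc => h ⟨h1, hc⟩
      have h2 : (a.set r x).length ≤ i := by simp [List.length_set]; omega
      have h3 : a.length ≤ i := by omega
      simp [List.getD, List.getElem?_eq_none h2, List.getElem?_eq_none h3]
    · simp [List.getD, List.getElem?_set_ne (fun hc => h1 hc.symm)]

lemma getD_append_lt {a : List Int} {b i : _} (h : i < a.length) :
    (a ++ [b]).getD i 0 = a.getD i 0 := by
  simp [List.getD, List.getElem?_append_left h]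

lemma getD_append_self {a : List Int} {b : Int} :
    (a ++ [b]).getD a.length 0 = b := by
  simp [List.getD]

-- the invariant is preserved by one insertion step
lemma mono_step {a : List Int} {x : Int} {r : Nat} (hm : Mono a) (hs : StopAt a x r) :
    (r = a.length → Mono (a ++ [x])) ∧ (r ≠ a.length → Mono (a.set r x)) := by
  obtain ⟨hl, hp, he⟩ := hs
  constructor
  · intro hr i j hij hj
    simp only [List.length_append, List.length_cons, List.length_nil] at hj
    by_cases hjl : j < a.length
    · rw [getD_append_lt hjl, getD_append_lt (by omega)]
      exact hm i j hij hjl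
    · have hj' : j = a.length := by omega
      subst hj'
      rw [getD_append_self]
      by_cases hil : i < a.length
      · rw [getD_append_lt hil]
        exact le_of_lt (hp i (hr ▸ hil))
      · have : i = a.length := by omega
        rw [this, getD_append_self]
  · intro hr
    have hrl : r < a.length := by omega
    have hxr : ¬ a.getD r 0 < x := he.resolve_left hr
    intro i j hij hj
    simp only [List.length_set] at hj
    rw [getD_set, getD_set]
    split_ifs with h1 h2 h2
    · rfl
    · exact le_trans (not_lt.mp hxr) (hm r j (h1.1 ▸ hij) hj)
    · exact le_of_lt (hp i (by omega))
    · exact hm i j hij hj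

-- structurally recursive rephrasing of pass 1 (lasts threaded, assignments collected in front)
def p1 (l : List Int) : List (List Int) → List Int × List Nat
  | [] => (l, [])
  | row :: rest =>
    let j := place l (row.headD 0) 0 l.length
    let r := p1 (if j = l.length then l ++ [row.headD 0] else l.set j (row.headD 0)) rest
    (r.1, j :: r.2)

lemma pass1_eq (pi : List (List Int)) :
    ∀ (l : List Int) (acc : List Nat),
      pi.foldl stepB1 (l, acc) = ((p1 l pi).1, acc ++ (p1 l pi).2) := by
  induction pi with
  | nil => intro l acc; simp [p1]
  | cons row rest ih =>
    intro l acc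
    simp only [List.foldl_cons, stepB1, p1]
    rw [ih]
    simp

lemma p1_len (pi : List (List Int)) :
    ∀ (l : List Int), l.length ≤ (p1 l pi).1.length := by
  induction pi with
  | nil => intro l; simp [p1]
  | cons row rest ih =>
    intro l
    simp only [p1]
    by_cases h : place l (row.headD 0) 0 l.length = l.length
    · rw [if_pos h]
      have := ih (l ++ [row.headD 0])
      simp only [List.length_append, List.length_cons, List.length_nil] at this
      omega
    · rw [if_neg h]
      have := ih (l.set (place l (row.headD 0) 0 l.length) (row.headD 0))
      simpa [List.length_set] using this

-- the main simulation: A's fold equals pass 2 run on pass 1's assignments,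
-- starting from the current piles padded with the right number of fresh empty piles
lemma main_sim (pi : List (List Int)) :
    ∀ (c : List (List (List Int))) (l : List Int),
      Mono l → c.length = l.length →
      (pi.foldl stepA (l.length, c, l)).2.1 =
      (pi.zip (p1 l pi).2).foldl stepB2
        (c ++ List.replicate ((p1 l pi).1.length - l.length) []) := by
  induction pi with
  | nil => intro c l hm hlen; simp [p1]
  | cons row rest ih =>
    intro c l hm hlen
    have hstopW : StopAt l (row.headD 0) (whileA l.length l (row.headD 0) 0) :=
      whileA_stop l (row.headD 0) l.length 0 (by omega) (by omega) (by omega)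
    have hje : whileA l.length l (row.headD 0) 0 = place l (row.headD 0) 0 l.length :=
      scan_eq_place l (row.headD 0) hm
    set j := place l (row.headD 0) 0 l.length with hj
    have hstop : StopAt l (row.headD 0) j := hje ▸ hstopW
    simp only [List.foldl_cons, stepA, hje]
    by_cases h : j = l.length
    · -- new pile
      rw [if_pos h]
      have hm' : Mono (l ++ [row.headD 0]) := (mono_step hm hstop).1 h
      have hN : l.length + 1 ≤ (p1 (l ++ [row.headD 0]) rest).1.length := by
        have := p1_len rest (l ++ [row.headD 0])
        simpa using this
      have hlen' : (c ++ [[row]]).length = (l ++ [row.headD 0]).length := by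
        simp [hlen]
      have H := ih (c ++ [[row]]) (l ++ [row.headD 0]) hm' hlen'
      simp only [List.length_append, List.length_cons, List.length_nil] at H
      rw [show l.length + 1 = (l ++ [row.headD 0]).length by simp] at H ⊢
      rw [H]
      -- unfold p1 on the RHS
      simp only [p1, ← hj, if_pos h]
      simp only [List.zip_cons_cons, List.foldl_cons]
      congr 1
      -- the first stepB2 application turns the first padding slot into [row]
      have hNlen : (p1 (l ++ [row.headD 0]) rest).1.length - l.length =
          ((p1 (l ++ [row.headD 0]) rest).1.length - (l ++ [row.headD 0]).length) + 1 := by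
        simp only [List.length_append, List.length_cons, List.length_nil]
        omega
      rw [hNlen, List.replicate_succ]
      simp only [stepB2, h, ← hlen]
      have hget : (c ++ ([] : List (List Int)) ::
          List.replicate ((p1 (l ++ [row.headD 0]) rest).1.length - (l ++ [row.headD 0]).length) []).getD c.length [] = ([] : List (List Int)) := by
        simp [List.getD]
      rw [hget]
      rw [List.set_append]
      simp
    · -- insert into existing pile
      rw [if_neg h]
      have hjl : j < l.length := by
        have := hstop.1
        omega
      have hm' : Mono (l.set j (row.headD 0)) := (mono_step hm hstop).2 h
      have hlen' : (c.set j (c.getD j [] ++ [row])).length = (l.set j (row.headD 0)).length := by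
        simp [hlen]
      have H := ih (c.set j (c.getD j [] ++ [row])) (l.set j (row.headD 0)) hm' hlen'
      simp only [List.length_set] at H
      rw [H]
      simp only [p1, ← hj, if_neg h]
      simp only [List.zip_cons_cons, List.foldl_cons]
      congr 1
      have hjc : j < c.length := by omega
      simp only [stepB2]
      have hget : (c ++ List.replicate ((p1 (l.set j (row.headD 0)) rest).1.length - l.length) []).getD j [] = c.getD j [] := by
        simp [List.getD, List.getElem?_append_left hjc]
      rw [hget, List.set_append]
      simp [hjc]

-- ===== VERDICT (by name: the statement is the Claim_ definition above) =====
theorem couverture_py_spec : Claim_equal_couverture_py := by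
  intro pi _ _
  unfold Spec_couverture_py couverture_py couverture_py_alt
  rw [pass1_eq pi [] []]
  have := main_sim pi [] [] (fun i j _ h => absurd h (by simp)) rfl
  simp only [List.length_nil] at this
  simpa using this
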